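-- pv_equiv track=rewrite | github.com/Prathamesh2708/CS765-Project | Assignment_2/simulator.py | number_of_branches
-- ===== SOURCE A (Python) =====
-- def number_of_branches(edge_dict):
--     in_edge_count = {}
--     for key in edge_dict:
--         for node in edge_dict[key]:
--             if node not in in_edge_count:
--                 in_edge_count[node] = 1
--             else:
--                 in_edge_count[node] += 1
--     total = 0
--     for key in in_edge_count:
--         total += in_edge_count[key]-1
--     return total
-- ===== SOURCE B (Python) =====
-- def number_of_branches(edge_dict):
--     total = sum(len(edge_dict[k]) for k in edge_dict)
--     targets = set()
--     for k in edge_dict: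
--         targets.update(edge_dict[k])
--     return total - len(targets)
-- ===== Notes on version B (the rewrite author's own statement) =====
-- stated objective: simpler
-- what changed: Replaces the per-node in-degree frequency dict and the subtract-one summation loop by the identity 'answer = total number of edge entries - number of distinct target nodes', computed with one length sum and one set.
import Mathlib
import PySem

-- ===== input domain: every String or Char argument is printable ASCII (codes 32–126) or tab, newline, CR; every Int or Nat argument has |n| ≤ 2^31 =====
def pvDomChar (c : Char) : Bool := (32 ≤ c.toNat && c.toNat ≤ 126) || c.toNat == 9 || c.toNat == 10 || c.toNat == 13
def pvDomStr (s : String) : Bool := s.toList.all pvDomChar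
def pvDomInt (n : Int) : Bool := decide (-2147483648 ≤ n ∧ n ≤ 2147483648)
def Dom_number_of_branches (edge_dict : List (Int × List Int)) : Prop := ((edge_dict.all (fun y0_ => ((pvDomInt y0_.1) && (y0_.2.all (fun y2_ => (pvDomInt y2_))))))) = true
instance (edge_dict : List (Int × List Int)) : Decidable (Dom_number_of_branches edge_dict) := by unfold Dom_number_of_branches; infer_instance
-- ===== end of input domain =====

-- B replaces A's in-degree frequency dict + subtract-one loop by the identity
-- 'total edge entries - distinct target nodes' (objective: simpler).

-- ===== PORT A =====
def number_of_branches (edge_dict : List (Int × List Int)) : Int :=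
  let in_edge_count : PySem.Dict Int Int :=
    edge_dict.foldl (fun d kv =>
      kv.2.foldl (fun d node =>
        if d.contains node = false then d.insert node 1
        else d.modify node 0 (· + 1)) d) PySem.Dict.empty
  in_edge_count.items.foldl (fun total kv => total + (kv.2 - 1)) 0

-- ===== PORT B =====
def number_of_branches_alt (edge_dict : List (Int × List Int)) : Int :=
  let total : Int := edge_dict.foldl (fun acc kv => acc + (kv.2.length : Int)) 0
  let targets : PySem.Set Int :=
    edge_dict.foldl (fun s kv => PySem.Set.update s kv.2) PySem.Set.empty
  total - PySem.Set.len targets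

-- ===== PRECONDITION & SPEC =====
def Spec_number_of_branches (edge_dict : List (Int × List Int)) (out : Int) : Prop := out = number_of_branches_alt edge_dict
instance (edge_dict : List (Int × List Int)) (out : Int) : Decidable (Spec_number_of_branches edge_dict out) := by unfold Spec_number_of_branches; infer_instance

-- ===== CLAIM (what is proved, stated in full; the proofs are below) =====
def Claim_equal_number_of_branches : Prop := ∀ (edge_dict : List (Int × List Int)), Dom_number_of_branches edge_dict → Spec_number_of_branches edge_dict (number_of_branches edge_dict)

-- ===== LEMMAS AND PROOFS =====

-- nested fold over the per-key lists = fold over the flattened node list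
theorem pv_foldl_flat {δ : Type} (f : δ → Int → δ) :
    ∀ (l : List (Int × List Int)) (init : δ),
      l.foldl (fun d kv => kv.2.foldl f d) init = (l.flatMap (·.2)).foldl f init := by
  intro l
  induction l with
  | nil => intro init; rfl
  | cons kv t ih =>
      intro init
      simp [List.flatMap_cons, List.foldl_append, ih]

-- the if-branching counter step is exactly Dict.modify's counter step
theorem pv_step_eq (d : PySem.Dict Int Int) (n : Int) :
    (if d.contains n = false then d.insert n 1 else d.modify n 0 (· + 1))
      = d.modify n 0 (· + 1) := by
  by_cases h : d.contains n
  · simp [h]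
  · have h0 : d.getD n 0 = 0 := PySem.Dict.getD_of_not_contains d 0 (by simpa using h)
    simp [h, PySem.Dict.modify, h0]

-- cast of a Nat sum
theorem pv_sum_cast (f : Int → ℕ) : ∀ (l : List Int),
    (l.map (fun k => (f k : Int))).sum = ((l.map f).sum : Int) := by
  intro l
  induction l with
  | nil => rfl
  | cons x t ih => simp [ih]

-- sum of counts over the distinct elements = length
theorem pv_sum_count (ns : List Int) :
    ((PySem.Set.ofList ns).map (fun k => ns.count k)).sum = ns.length := by
  have hperm : (PySem.Set.ofList ns).Perm ns.dedup := by
    rw [List.perm_ext_iff_of_nodup (PySem.Set.nodup_ofList ns) ns.nodup_dedup]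
    intro a
    rw [PySem.Set.mem_ofList, List.mem_dedup]
  calc ((PySem.Set.ofList ns).map (fun k => ns.count k)).sum
      = (ns.dedup.map (fun k => ns.count k)).sum :=
        (hperm.map (fun k => ns.count k)).sum_eq
    _ = ns.length := (List.sum_map_count_dedup_eq_length ns)

-- cast of a sum of lengths over pairs
theorem pv_len_cast : ∀ (l : List (Int × List Int)),
    (l.map (fun kv => ((kv.2.length : Int)))).sum = Nat.cast ((l.map (fun kv => kv.2.length)).sum) := by
  intro l
  induction l with
  | nil => rfl
  | cons x t ih => simp [ih]

-- sum of (f k - 1) over a list = sum f - length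
theorem pv_sum_sub_one (f : Int → Int) : ∀ (l : List Int),
    (l.map (fun k => f k - 1)).sum = (l.map f).sum - l.length := by
  intro l
  induction l with
  | nil => simp
  | cons x t ih => simp [ih]; ring

-- ===== VERDICT (by name: the statement is the Claim_ definition above) =====
theorem number_of_branches_spec : Claim_equal_number_of_branches := by
  intro l _
  unfold Spec_number_of_branches number_of_branches number_of_branches_alt
  simp only []
  set ns := l.flatMap (·.2) with hns
  -- A side: the nested counting loop is Counter(ns)
  have hdict :
      l.foldl (fun d kv =>
        kv.2.foldl (fun d node =>
          if d.contains node = false then d.insert node 1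
          else d.modify node 0 (· + 1)) d) PySem.Dict.empty
        = PySem.Dict.counter ns := by
    rw [pv_foldl_flat, ← hns]
    exact Eq.trans
      (PySem.List.foldl_congr_mem _ _ _ _ (fun acc x _ => pv_step_eq acc x))
      (PySem.Dict.counter_eq_foldl ns).symm
  rw [hdict, PySem.Dict.items_counter]
  -- the summation loop
  rw [PySem.List.foldl_add]
  rw [List.map_map]
  have hmapeq : ((PySem.Set.ofList ns).map ((fun kv : Int × Int => kv.2 - 1) ∘ (fun k => (k, (ns.count k : Int)))))
      = (PySem.Set.ofList ns).map (fun k => (ns.count k : Int) - 1) := rfl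
  rw [hmapeq, pv_sum_sub_one]
  -- B side: total and targets
  have htot : l.foldl (fun acc kv => acc + (kv.2.length : Int)) 0
      = (ns.length : Int) := by
    rw [PySem.List.foldl_add, zero_add, pv_len_cast l, hns, List.length_flatMap]
  have hset : l.foldl (fun s kv => PySem.Set.update s kv.2) PySem.Set.empty
      = PySem.Set.ofList ns := by
    show l.foldl (fun s kv => kv.2.foldl PySem.Set.add s) PySem.Set.empty = _
    rw [pv_foldl_flat]
    rfl
  rw [htot, hset]
  have hc := pv_sum_cast (fun k => ns.count k) (PySem.Set.ofList ns)
  rw [hc, pv_sum_count ns]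
  show (0 : Int) + (ns.length - (PySem.Set.ofList ns).length)
      = (ns.length : Int) - PySem.Set.len (PySem.Set.ofList ns)
  simp [PySem.Set.len]
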